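-- pv_equiv track=rewrite | github.com/MrBrantCode/unitest_baseline | mut_generate/mist_train_cf/cf_16664/solution.py | check_consecutive_special_characters
-- ===== SOURCE A (Python) =====
-- def check_consecutive_special_characters(string):
--     special_characters = set("!@#$%^&*()_-+=<>?/,.:;'{}[]|~`")
--     count = 0
--
--     for char in string:
--         if char in special_characters:
--             count += 1
--             if count >= 3:
--                 return True
--         else:
--             count = 0
--
--     return False
-- ===== SOURCE B (Python) =====
-- def check_consecutive_special_characters(string):
--     specials = "!@#$%^&*()_-+=<>?/,.:;'{}[]|~`"
--     return any(all(c in specials for c in string[i:i + 3])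
--                for i in range(len(string) - 2))
-- ===== Notes on version B (the rewrite author's own statement) =====
-- stated objective: alternative
-- what changed: B replaces A's stateful run-length counter with early return by a stateless scan over all length-3 windows (any/all over sliding slices).
import Mathlib
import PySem

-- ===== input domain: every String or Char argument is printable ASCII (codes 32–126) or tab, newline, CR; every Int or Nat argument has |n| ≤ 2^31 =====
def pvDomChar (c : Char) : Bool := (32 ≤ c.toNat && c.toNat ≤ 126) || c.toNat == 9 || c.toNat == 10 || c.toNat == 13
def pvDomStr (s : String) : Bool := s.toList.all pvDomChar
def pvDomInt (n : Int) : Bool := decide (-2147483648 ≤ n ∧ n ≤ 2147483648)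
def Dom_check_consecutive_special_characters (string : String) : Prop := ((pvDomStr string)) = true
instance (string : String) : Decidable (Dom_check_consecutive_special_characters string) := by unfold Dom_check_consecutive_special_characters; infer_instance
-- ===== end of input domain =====

-- B scans all length-3 windows with any/all instead of A's stateful run-length counter; alternative, same cost.

-- ===== PORT A =====
-- the characters of the Python literal "!@#$%^&*()_-+=<>?/,.:;'{}[]|~`"
def pvSpecials : List Char := "!@#$%^&*()_-+=<>?/,.:;'{}[]|~`".toList

-- Python: special_characters = set("…")
def pvSpecialSet : PySem.Set Char := PySem.Set.ofList pvSpecials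

-- the for-loop of A, carrying `count`; returning true models A's early `return True`
def pvLoopA : List Char → Nat → Bool
  | [], _ => false
  | c :: rest, count =>
    if PySem.Set.contains pvSpecialSet c then
      if count + 1 ≥ 3 then true else pvLoopA rest (count + 1)
    else
      pvLoopA rest 0

def check_consecutive_special_characters (string : String) : Bool :=
  pvLoopA string.toList 0

-- ===== PORT B =====
def pvIsSpec (c : Char) : Bool := pvSpecials.contains c   -- Python: c in specials (a string)

-- all(c in specials for c in string[i:i+3]); i from range is ≥ 0 and in range, so
-- string[i:i+3] = (drop i).take 3 (exact for 0 ≤ i)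
def pvWin (cs : List Char) (i : Nat) : Bool := ((cs.drop i).take 3).all pvIsSpec

-- range(len(string) - 2): Nat truncated subtraction = empty range for len < 2, as in Python
def check_consecutive_special_characters_alt (string : String) : Bool :=
  let cs := string.toList
  (List.range (cs.length - 2)).any (pvWin cs)

-- ===== PRECONDITION & SPEC =====
def Spec_check_consecutive_special_characters (string : String) (out : Bool) : Prop := out = check_consecutive_special_characters_alt string
instance (string : String) (out : Bool) : Decidable (Spec_check_consecutive_special_characters string out) := by unfold Spec_check_consecutive_special_characters; infer_instance

-- ===== CLAIM (what is proved, stated in full; the proofs are below) =====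
def Claim_equal_check_consecutive_special_characters : Prop := ∀ (string : String), Dom_check_consecutive_special_characters string → Spec_check_consecutive_special_characters string (check_consecutive_special_characters string)

-- ===== LEMMAS AND PROOFS =====

-- the specials string has no duplicates, so set(...) keeps its characters as is
theorem pvSpecialSet_eq : pvSpecialSet = pvSpecials := by decide

theorem pv_mem_eq (c : Char) : PySem.Set.contains pvSpecialSet c = pvIsSpec c := by
  rw [pvSpecialSet_eq]; rfl

theorem pvLoopA_cons (c : Char) (rest : List Char) (count : Nat) :
    pvLoopA (c :: rest) count =
      if pvIsSpec c then (if count + 1 >= 3 then true else pvLoopA rest (count + 1))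
      else pvLoopA rest 0 := by
  show (if PySem.Set.contains pvSpecialSet c then
          (if count + 1 >= 3 then true else pvLoopA rest (count + 1))
        else pvLoopA rest 0) = _
  rw [pv_mem_eq]

-- length of the initial run of special characters
def pvRun : List Char → Nat
  | [] => 0
  | c :: rest => if pvIsSpec c then pvRun rest + 1 else 0

-- B's body, as a function of the character list
def pvW (cs : List Char) : Bool := (List.range (cs.length - 2)).any (pvWin cs)

theorem pvW_cons (c : Char) (cs : List Char) :
    pvW (c :: cs) = (((c :: cs).take 3).all pvIsSpec && decide (3 ≤ (c :: cs).length) || pvW cs) := by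
  match cs with
  | [] =>
    have h1 : pvW [c] = false := rfl
    have h2 : pvW ([] : List Char) = false := rfl
    rw [h1, h2]; simp
  | [d] =>
    have h1 : pvW [c, d] = false := rfl
    have h2 : pvW [d] = false := rfl
    rw [h1, h2]; simp
  | d :: e :: r =>
    simp only [pvW, List.length_cons]
    rw [show r.length + 1 + 1 + 1 - 2 = r.length + 1 from by omega,
        show r.length + 1 + 1 - 2 = r.length from by omega,
        List.range_succ_eq_map, List.any_cons, List.any_map]
    have hf : (pvWin (c :: d :: e :: r) ∘ (· + 1)) = pvWin (d :: e :: r) :=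
      funext (fun i => rfl)
    rw [hf]
    have h0 : pvWin (c :: d :: e :: r) 0 = ((c :: d :: e :: r).take 3).all pvIsSpec := rfl
    rw [h0]
    simp

theorem pvRun_three_W (cs : List Char) (h : 3 ≤ pvRun cs) : pvW cs = true := by
  match cs with
  | [] => exact absurd h (by simp [pvRun])
  | [a] => simp only [pvRun] at h; split at h <;> omega
  | [a, b] =>
    simp only [pvRun] at h
    by_cases ha : pvIsSpec a = true
    · rw [if_pos ha] at h
      by_cases hb : pvIsSpec b = true
      · rw [if_pos hb] at h; omega
      · rw [if_neg hb] at h; omega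
    · rw [if_neg ha] at h; omega
  | a :: b :: c :: r =>
    simp only [pvRun] at h
    by_cases ha : pvIsSpec a = true
    case neg => rw [if_neg ha] at h; omega
    rw [if_pos ha] at h
    by_cases hb : pvIsSpec b = true
    case neg => rw [if_neg hb] at h; omega
    rw [if_pos hb] at h
    by_cases hc : pvIsSpec c = true
    case neg => rw [if_neg hc] at h; omega
    simp only [pvW, List.length_cons]
    rw [show r.length + 1 + 1 + 1 - 2 = r.length + 1 from by omega]
    refine List.any_eq_true.mpr ⟨0, List.mem_range.mpr (Nat.succ_pos _), ?_⟩
    simp [pvWin, ha, hb, hc]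

theorem pvLoopA_eq (cs : List Char) : ∀ count : Nat, count ≤ 2 →
    pvLoopA cs count = (decide (3 ≤ count + pvRun cs) || pvW cs) := by
  induction cs with
  | nil =>
    intro count hc
    have h1 : pvLoopA [] count = false := rfl
    have h2 : pvW ([] : List Char) = false := rfl
    have h3 : pvRun [] = 0 := rfl
    rw [h1, h2, h3]
    simp
    omega
  | cons c rest ih =>
    intro count hc
    rw [pvLoopA_cons, pvW_cons]
    by_cases hs : pvIsSpec c = true
    · rw [if_pos hs]
      have hr : pvRun (c :: rest) = pvRun rest + 1 := by simp [pvRun, hs]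
      rw [hr]
      by_cases h3 : count + 1 ≥ 3
      · rw [if_pos h3, decide_eq_true (by omega : 3 ≤ count + (pvRun rest + 1))]
        simp
      · rw [if_neg h3, ih (count + 1) (by omega)]
        have hd : decide (3 ≤ count + 1 + pvRun rest) = decide (3 ≤ count + (pvRun rest + 1)) := by
          by_cases h : 3 ≤ count + 1 + pvRun rest
          · rw [decide_eq_true h, decide_eq_true (by omega)]
          · rw [decide_eq_false h, decide_eq_false (by omega)]
        rw [hd]
        cases hw : (((c :: rest).take 3).all pvIsSpec && decide (3 ≤ (c :: rest).length)) with
        | false => simp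
        | true =>
          have h2 : 2 ≤ pvRun rest := by
            match rest with
            | [] => simp at hw
            | [d] => simp at hw
            | d :: e :: r =>
              simp only [List.take, List.all_cons, Bool.and_eq_true] at hw
              simp [pvRun, hw.1.2.1, hw.1.2.2.1]
          rw [decide_eq_true (by omega : 3 ≤ count + (pvRun rest + 1))]
          simp
    · rw [if_neg hs, ih 0 (by omega)]
      have hr : pvRun (c :: rest) = 0 := by simp [pvRun, hs]
      have hw : (((c :: rest).take 3).all pvIsSpec && decide (3 ≤ (c :: rest).length)) = false := by
        cases rest with
        | nil => simp [hs]
        | cons d r => simp [hs]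
      rw [hr, hw, decide_eq_false (by omega : ¬ 3 ≤ count + 0)]
      by_cases h3 : 3 ≤ pvRun rest
      · rw [decide_eq_true (by omega : 3 ≤ 0 + pvRun rest), pvRun_three_W rest h3]
        simp
      · rw [decide_eq_false (by omega : ¬ 3 ≤ 0 + pvRun rest)]
        simp

-- ===== VERDICT (by name: the statement is the Claim_ definition above) =====
theorem check_consecutive_special_characters_spec : Claim_equal_check_consecutive_special_characters := by
  intro s _
  show pvLoopA s.toList 0 = _
  rw [pvLoopA_eq s.toList 0 (by omega)]
  have halt : check_consecutive_special_characters_alt s = pvW s.toList := rfl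
  rw [halt]
  by_cases h3 : 3 ≤ pvRun s.toList
  · rw [decide_eq_true (by omega : 3 ≤ 0 + pvRun s.toList), pvRun_three_W _ h3]
    simp
  · rw [decide_eq_false (by omega : ¬ 3 ≤ 0 + pvRun s.toList)]
    simp
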